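-- pv_equiv track=rewrite | github.com/SSahanaSS/whatsapp_agent | services/db.py | get_prep_time
-- ===== SOURCE A (Python) =====
-- def get_prep_time(items):
--     """Base prep time from total quantity of items ordered."""
--     total_qty = sum(item["qty"] for item in items)
--     if total_qty <= 2:
--         return 15
--     elif total_qty <= 5:
--         return 25
--     elif total_qty <= 10:
--         return 35
--     else:
--         return 50
-- ===== SOURCE B (Python) =====
-- _THRESHOLDS = [2, 5, 10]
-- _TIMES = [15, 25, 35, 50]
--
-- def _bisect_left(a, x):
--     lo, hi = 0, len(a)
--     while lo < hi:
--         mid = (lo + hi) // 2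
--         if a[mid] < x:
--             lo = mid + 1
--         else:
--             hi = mid
--     return lo
--
-- def get_prep_time(items):
--     """Base prep time from total quantity of items ordered."""
--     total_qty = sum(item["qty"] for item in items)
--     return _TIMES[_bisect_left(_THRESHOLDS, total_qty)]
-- ===== Notes on version B (the rewrite author's own statement) =====
-- stated objective: alternative
-- what changed: Replaces the sequential if-elif comparison chain with parallel threshold/time tables and a hand-written binary search (bisect_left) that indexes the time table.
import Mathlib
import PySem

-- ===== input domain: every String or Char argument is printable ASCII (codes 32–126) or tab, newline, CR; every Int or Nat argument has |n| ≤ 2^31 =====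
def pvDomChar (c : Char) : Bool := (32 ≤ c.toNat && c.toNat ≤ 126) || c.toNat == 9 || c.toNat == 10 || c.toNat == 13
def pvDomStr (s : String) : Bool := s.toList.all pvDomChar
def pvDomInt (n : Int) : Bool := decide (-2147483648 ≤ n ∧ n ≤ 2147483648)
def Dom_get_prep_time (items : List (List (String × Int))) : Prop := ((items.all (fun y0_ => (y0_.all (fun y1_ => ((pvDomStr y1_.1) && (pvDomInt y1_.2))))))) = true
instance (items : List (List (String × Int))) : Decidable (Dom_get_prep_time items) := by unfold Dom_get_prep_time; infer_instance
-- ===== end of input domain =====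

-- B replaces A's if-elif chain by parallel threshold/time tables and a hand-written
-- binary search (bisect_left); same O(n) cost, different structure (objective: alternative).

-- ===== PORT A =====
-- total_qty = sum(item["qty"] for item in items); none = KeyError (excluded by Pre_)
def pvTotalQtyA (items : List (List (String × Int))) : Option Int :=
  items.foldl (fun acc item => acc.bind (fun a => ((PySem.Dict.mk item).get? "qty").map (fun q => a + q))) (some 0)

def get_prep_time (items : List (List (String × Int))) : Int :=
  match pvTotalQtyA items with
  | none => 0  -- unreachable under Pre_ (KeyError in Python)
  | some total_qty =>
    if total_qty ≤ 2 then 15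
    else if total_qty ≤ 5 then 25
    else if total_qty ≤ 10 then 35
    else 50

-- ===== PORT B =====
-- hand-written bisect_left from Source B, step for step; the while loop becomes structural recursion on
-- fuel = hi - lo (an upper bound on the iteration count, so the fuel-0 branch is never taken);
-- a[mid] is always in range since lo < hi ≤ len a
def pvBisectLeftB (a : List Int) (x : Int) : Nat → Nat → Nat → Nat
  | 0, lo, _hi => lo
  | fuel + 1, lo, hi =>
    if lo < hi then
      let mid := (lo + hi) / 2
      if a.getD mid 0 < x then pvBisectLeftB a x fuel (mid + 1) hi
      else pvBisectLeftB a x fuel lo mid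
    else lo

def pvTotalQtyB (items : List (List (String × Int))) : Option Int :=
  items.foldl (fun acc item => acc.bind (fun a => ((PySem.Dict.mk item).get? "qty").map (fun q => a + q))) (some 0)

def get_prep_time_alt (items : List (List (String × Int))) : Int :=
  match pvTotalQtyB items with
  | none => 0  -- unreachable under Pre_ (KeyError in Python)
  | some total_qty =>
    [15, 25, 35, 50].getD (pvBisectLeftB [2, 5, 10] total_qty 3 0 3) 0

-- ===== PRECONDITION & SPEC =====
-- Pre_ excludes exactly the inputs where some item lacks the "qty" key: both A and B raise KeyError there.
def Pre_get_prep_time (items : List (List (String × Int))) : Prop :=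
  (items.all (fun item => (PySem.Dict.mk item).contains "qty")) = true
instance (items : List (List (String × Int))) : Decidable (Pre_get_prep_time items) := by
  unfold Pre_get_prep_time; infer_instance

def pvWitness_get_prep_time : (List (List (String × Int))) := [[("qty", 3)], [("qty", 1)]]

def Spec_get_prep_time (items : List (List (String × Int))) (out : Int) : Prop := out = get_prep_time_alt items
instance (items : List (List (String × Int))) (out : Int) : Decidable (Spec_get_prep_time items out) := by unfold Spec_get_prep_time; infer_instance

-- ===== CLAIM (what is proved, stated in full; the proofs are below) =====
def Claim_equal_get_prep_time : Prop := ∀ (items : List (List (String × Int))), Dom_get_prep_time items → Pre_get_prep_time items → Spec_get_prep_time items (get_prep_time items)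

-- ===== LEMMAS AND PROOFS =====

-- the bucket of A's if-chain equals B's table lookup through binary search, for every total
theorem pv_bucket_eq (q : Int) :
    (if q ≤ 2 then (15 : Int) else if q ≤ 5 then 25 else if q ≤ 10 then 35 else 50)
      = [15, 25, 35, 50].getD (pvBisectLeftB [2, 5, 10] q 3 0 3) 0 := by
  have hb : pvBisectLeftB [2, 5, 10] q 3 0 3
      = if 5 < q then (if 10 < q then 3 else 2) else (if 2 < q then 1 else 0) := by
    simp [pvBisectLeftB]
  rw [hb]
  split_ifs <;> simp <;> omega

theorem pv_fold_isSome (items : List (List (String × Int)))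
    (hp : (items.all (fun item => (PySem.Dict.mk item).contains "qty")) = true) (a : Int) :
    (items.foldl (fun acc item => acc.bind (fun a => ((PySem.Dict.mk item).get? "qty").map (fun q => a + q))) (some a)).isSome := by
  induction items generalizing a with
  | nil => simp
  | cons item rest ih =>
    simp only [List.all_cons, Bool.and_eq_true] at hp
    obtain ⟨h1, h2⟩ := hp
    rw [PySem.Dict.contains_eq_isSome_get?] at h1
    cases hg : (PySem.Dict.mk item).get? "qty" with
    | none => simp [hg] at h1
    | some q => simpa [List.foldl, hg] using ih h2 (a + q)

theorem pv_total_isSome (items : List (List (String × Int)))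
    (hp : Pre_get_prep_time items) : (pvTotalQtyA items).isSome :=
  pv_fold_isSome items hp 0

-- ===== VERDICT (by name: the statement is the Claim_ definition above) =====
theorem get_prep_time_spec : Claim_equal_get_prep_time := by
  intro items _ hp
  unfold Spec_get_prep_time get_prep_time get_prep_time_alt
  have hs := pv_total_isSome items hp
  have : pvTotalQtyB items = pvTotalQtyA items := rfl
  rw [this]
  cases hq : pvTotalQtyA items with
  | none => simp [hq] at hs
  | some q => exact pv_bucket_eq q
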